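-- pv_equiv track=rewrite | github.com/MateoGonzalezPautaso/fiuba-computer-engineering | TB024-teoria-de-algoritmos/TP3/algoritmos/verificador_polinomial.py | grupos_parejos
-- ===== SOURCE A (Python) =====
-- def grupos_parejos(maestros_agua, k, B, subgrupos):
--     '''
--     maestros_agua = es una lista de tuplas pero la convertimos en un diccionario que usa como clave el nombre del maestro y almacena su poder,
--     esto para mejorar la complejidad de ejecucion
--     k = la cantidad de subgrupos a armar
--     B = valor que debe ser mayor a la adición de los cuadrados de las sumas de las fuerzas de los grupos
--     subgrupos = lista de listas donde cada sublista representa un grupo de maestros del estilo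
--     [
--         ["Mateo", "Agustin"],
--         ["Tiago"]
--     ]
--
--     Cada elemento xi debe estar asignado a un grupo y sólo un grupo.
--     '''
--     maestros_dict = {nombre: poder for nombre, poder in maestros_agua}
--     maestros_agua = maestros_dict
--
--     if len(subgrupos) != k:
--         return False    # La cantidad de subgrupos no coincide con k
--
--     asignados = set()
--     B_conseguido = 0
--
--     for subgrupo in subgrupos:
--         poder_subgrupo = 0
--
--         for nombre_maestro in subgrupo:
--
--             if nombre_maestro in asignados or nombre_maestro not in maestros_agua:
--                 return False    # El maestro solo puede estar asignado a un subgrupo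
--
--             asignados.add(nombre_maestro)
--             poder_subgrupo += maestros_agua[nombre_maestro]
--
--         B_conseguido += poder_subgrupo ** 2
--
--     if len(asignados) != len(maestros_agua):
--         return False    # Cada maestro debe estar asignado a un grupo
--
--     return B_conseguido <= B
-- ===== SOURCE B (Python) =====
-- def grupos_parejos(maestros_agua, k, B, subgrupos):
--     maestros = {nombre: poder for nombre, poder in maestros_agua}
--     if len(subgrupos) != k:
--         return False
--     todos = [nombre for sub in subgrupos for nombre in sub]
--     if not all(nombre in maestros for nombre in todos):
--         return False
--     if len(set(todos)) != len(todos):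
--         return False
--     if set(todos) != set(maestros):
--         return False
--     return sum(sum(maestros[n] for n in sub) ** 2 for sub in subgrupos) <= B
-- ===== Notes on version B (the rewrite author's own statement) =====
-- stated objective: alternative
-- what changed: A's single fused loop that validates membership/duplicates with early returns while accumulating the squared sums is replaced by separate passes: flatten all names, validate the partition by set algebra (all names are keys, no duplicates, full coverage), then accumulate the sum of squared subgroup sums.
import Mathlib
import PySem

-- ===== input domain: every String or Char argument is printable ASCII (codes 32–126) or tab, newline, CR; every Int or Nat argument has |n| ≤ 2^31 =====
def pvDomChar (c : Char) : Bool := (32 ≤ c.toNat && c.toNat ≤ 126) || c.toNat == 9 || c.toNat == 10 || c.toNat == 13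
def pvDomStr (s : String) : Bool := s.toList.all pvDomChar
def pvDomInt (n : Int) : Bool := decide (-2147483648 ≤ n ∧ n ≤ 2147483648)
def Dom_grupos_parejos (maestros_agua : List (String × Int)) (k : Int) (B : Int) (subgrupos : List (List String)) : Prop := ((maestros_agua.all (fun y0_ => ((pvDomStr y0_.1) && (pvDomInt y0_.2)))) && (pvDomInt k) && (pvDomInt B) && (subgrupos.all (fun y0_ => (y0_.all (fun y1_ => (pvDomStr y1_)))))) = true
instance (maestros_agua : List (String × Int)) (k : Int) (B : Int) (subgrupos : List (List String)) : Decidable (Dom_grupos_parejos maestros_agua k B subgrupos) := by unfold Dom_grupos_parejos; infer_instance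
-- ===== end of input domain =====

-- B replaces A's fused validate-and-accumulate loop (early returns) by two separate passes:
-- set-algebra validation of the partition on the flattened name list, then the squared-sum accumulation;
-- objective: alternative decomposition (same linear cost). Equivalence of the RETURN value is proved below.

-- ===== PORT A =====
-- inner 'for nombre_maestro in subgrupo' loop of A (none = early 'return False')
def gpInner (d : PySem.Dict String Int) (sub : List String)
    (asig : PySem.Set String) (pow : Int) : Option (PySem.Set String × Int) :=
  match sub with
  | [] => some (asig, pow)
  | n :: rest =>
    if PySem.Set.contains asig n || !(d.contains n) then none
    else gpInner d rest (PySem.Set.add asig n) (pow + d.getD n 0)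

-- outer 'for subgrupo in subgrupos' loop of A (none = early 'return False')
def gpOuter (d : PySem.Dict String Int) (subs : List (List String))
    (asig : PySem.Set String) (acc : Int) : Option (PySem.Set String × Int) :=
  match subs with
  | [] => some (asig, acc)
  | sub :: rest =>
    match gpInner d sub asig 0 with
    | none => none
    | some (asig', pow) => gpOuter d rest asig' (acc + pow ^ 2)

def grupos_parejos (maestros_agua : List (String × Int)) (k : Int) (B : Int) (subgrupos : List (List String)) : Bool :=
  let d := PySem.Dict.ofList maestros_agua
  if (PySem.List.len subgrupos ≠ k) then false
  else
    match gpOuter d subgrupos PySem.Set.empty 0 with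
    | none => false
    | some (asig, bCons) =>
      if PySem.Set.len asig ≠ (PySem.Dict.size d : Int) then false
      else decide (bCons ≤ B)

-- ===== PORT B =====
def grupos_parejos_alt (maestros_agua : List (String × Int)) (k : Int) (B : Int) (subgrupos : List (List String)) : Bool :=
  let d := PySem.Dict.ofList maestros_agua
  if (PySem.List.len subgrupos ≠ k) then false
  else
    let todos := subgrupos.flatMap (fun sub => sub)
    if !(todos.all (fun n => d.contains n)) then false
    else if PySem.Set.len (PySem.Set.ofList todos) ≠ PySem.List.len todos then false
    else if !(PySem.Set.equal (PySem.Set.ofList todos) (PySem.Set.ofList d.keys)) then false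
    else decide ((subgrupos.map (fun sub => ((sub.map (fun n => d.getD n 0)).sum) ^ 2)).sum ≤ B)

-- ===== PRECONDITION & SPEC =====
def Spec_grupos_parejos (maestros_agua : List (String × Int)) (k : Int) (B : Int) (subgrupos : List (List String)) (out : Bool) : Prop := out = grupos_parejos_alt maestros_agua k B subgrupos
instance (maestros_agua : List (String × Int)) (k : Int) (B : Int) (subgrupos : List (List String)) (out : Bool) : Decidable (Spec_grupos_parejos maestros_agua k B subgrupos out) := by unfold Spec_grupos_parejos; infer_instance

-- ===== CLAIM (what is proved, stated in full; the proofs are below) =====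
def Claim_equal_grupos_parejos : Prop := ∀ (maestros_agua : List (String × Int)) (k : Int) (B : Int) (subgrupos : List (List String)), Dom_grupos_parejos maestros_agua k B subgrupos → Spec_grupos_parejos maestros_agua k B subgrupos (grupos_parejos maestros_agua k B subgrupos)

-- ===== LEMMAS AND PROOFS =====

-- set(xs) is a sublist of xs
theorem ofList_sublist (xs : List String) : (PySem.Set.ofList xs).Sublist xs := by
  induction xs using List.reverseRecOn with
  | nil => simp [PySem.Set.ofList_nil]
  | append_singleton ys y ih =>
    rw [PySem.Set.ofList_append_singleton, PySem.Set.add_eq_ite]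
    split
    · exact ih.trans (List.sublist_append_left ys [y])
    · exact ih.append (List.Sublist.refl [y])

theorem length_ofList_eq_iff (xs : List String) :
    (PySem.Set.ofList xs).length = xs.length ↔ xs.Nodup := by
  constructor
  · intro h
    have := (ofList_sublist xs).eq_of_length h
    rw [← this]; exact PySem.Set.nodup_ofList xs
  · intro h; rw [PySem.Set.ofList_eq_self_of_nodup xs h]

-- characterization of A's inner loop
theorem gpInner_char (d : PySem.Dict String Int) (sub : List String)
    (asig : PySem.Set String) (pow : Int) (h : asig.Nodup) :
    gpInner d sub asig pow =
      if (∀ n ∈ sub, d.contains n = true) ∧ (asig ++ sub).Nodup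
      then some (asig ++ sub, pow + (sub.map (fun n => d.getD n 0)).sum)
      else none := by
  induction sub generalizing asig pow with
  | nil => simp [gpInner, h]
  | cons n rest ih =>
    rw [gpInner]
    by_cases hmem : n ∈ asig
    · have : PySem.Set.contains asig n = true := (PySem.Set.contains_iff asig n).mpr hmem
      rw [if_pos (by simp; exact Or.inl hmem)]
      rw [if_neg]
      rintro ⟨-, hnd⟩
      exact List.disjoint_of_nodup_append hnd hmem (by simp)
    · have hc : PySem.Set.contains asig n = false := by
        by_contra hc
        exact hmem ((PySem.Set.contains_iff asig n).mp (by simpa using hc))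
      by_cases hd : d.contains n = true
      · rw [if_neg (by simp [hd]; exact hmem)]
        have hnd1 : (asig ++ [n]).Nodup := by
          refine h.append (List.nodup_singleton n) ?_
          intro a ha hb
          have : a = n := by simpa using hb
          exact hmem (this ▸ ha)
        rw [show PySem.Set.add asig n = asig ++ [n] from PySem.Set.add_of_not_mem hmem]
        rw [ih (asig ++ [n]) _ hnd1]
        have hiff : ((∀ m ∈ rest, d.contains m = true) ∧ ((asig ++ [n]) ++ rest).Nodup)
            ↔ ((∀ m ∈ n :: rest, d.contains m = true) ∧ (asig ++ n :: rest).Nodup) := by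
          constructor
          · rintro ⟨ha, hb⟩
            refine ⟨fun m hm => ?_, by simpa [List.append_assoc] using hb⟩
            rcases List.mem_cons.mp hm with rfl | hm
            · exact hd
            · exact ha m hm
          · rintro ⟨ha, hb⟩
            exact ⟨fun m hm => ha m (List.mem_cons_of_mem _ hm), by simpa [List.append_assoc] using hb⟩
        split
        · rw [if_pos (hiff.mp ‹_›)]
          simp [List.append_assoc]
          ring
        · rw [if_neg (fun hh => ‹¬_› (hiff.mpr hh))]
      · rw [if_pos (by simp [Bool.eq_false_iff.mpr hd])]
        rw [if_neg]
        rintro ⟨ha, -⟩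
        exact hd (ha n (by simp))
-- characterization of A's outer loop
theorem gpOuter_char (d : PySem.Dict String Int) (subs : List (List String))
    (asig : PySem.Set String) (acc : Int) (h : asig.Nodup) :
    gpOuter d subs asig acc =
      if (∀ n ∈ subs.flatMap (fun sub => sub), d.contains n = true) ∧ (asig ++ subs.flatMap (fun sub => sub)).Nodup
      then some (asig ++ subs.flatMap (fun sub => sub),
                 acc + (subs.map (fun sub => ((sub.map (fun n => d.getD n 0)).sum) ^ 2)).sum)
      else none := by
  induction subs generalizing asig acc with
  | nil => simp [gpOuter, h]
  | cons sub rest ih =>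
    rw [gpOuter, gpInner_char d sub asig 0 h]
    by_cases hok : (∀ n ∈ sub, d.contains n = true) ∧ (asig ++ sub).Nodup
    · rw [if_pos hok]
      dsimp only
      rw [ih _ _ hok.2]
      have hiff : ((∀ n ∈ rest.flatMap (fun s => s), d.contains n = true) ∧ ((asig ++ sub) ++ rest.flatMap (fun s => s)).Nodup)
          ↔ ((∀ n ∈ (sub :: rest).flatMap (fun s => s), d.contains n = true) ∧ (asig ++ (sub :: rest).flatMap (fun s => s)).Nodup) := by
        constructor
        · rintro ⟨ha, hb⟩
          refine ⟨fun n hn => ?_, by simpa [List.append_assoc] using hb⟩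
          simp only [List.flatMap_cons, List.mem_append] at hn
          rcases hn with hn | hn
          · exact hok.1 n hn
          · exact ha n hn
        · rintro ⟨ha, hb⟩
          refine ⟨fun n hn => ha n (by simp only [List.flatMap_cons, List.mem_append]; right; exact hn), ?_⟩
          simpa [List.append_assoc] using hb
      split
      · rw [if_pos (hiff.mp ‹_›)]
        simp [List.flatMap_cons, List.append_assoc]
        ring
      · rw [if_neg (fun hh => ‹¬_› (hiff.mpr hh))]
    · rw [if_neg hok, if_neg]
      rintro ⟨ha, hb⟩
      apply hok
      constructor
      · intro n hn; exact ha n (by simp only [List.flatMap_cons, List.mem_append]; left; exact hn)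
      · have := hb.sublist ((List.sublist_append_left sub (rest.flatMap (fun s => s))).append_left asig)
        simpa using this

theorem nodup_subset_length_iff {xs ys : List String} (hx : xs.Nodup) (hy : ys.Nodup)
    (hsub : ∀ n ∈ xs, n ∈ ys) : (xs.length = ys.length) ↔ (∀ n, n ∈ xs ↔ n ∈ ys) := by
  have hsp : xs.Subperm ys := List.subperm_of_subset hx hsub
  constructor
  · intro hlen
    have hperm : xs.Perm ys := hsp.perm_of_length_le (le_of_eq hlen.symm)
    exact fun n => hperm.mem_iff
  · intro hmem
    have hsp' : ys.Subperm xs := List.subperm_of_subset hy (fun n hn => (hmem n).mpr hn)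
    exact le_antisymm hsp.length_le hsp'.length_le

-- ===== VERDICT (by name: the statement is the Claim_ definition above) =====
theorem grupos_parejos_spec : Claim_equal_grupos_parejos := by
  intro ma k B subs _
  unfold Spec_grupos_parejos grupos_parejos grupos_parejos_alt
  set d := PySem.Dict.ofList ma with hd
  by_cases hk : PySem.List.len subs ≠ k
  · rw [if_pos hk, if_pos hk]
  · rw [if_neg hk, if_neg hk]
    set todos := subs.flatMap (fun sub => sub) with ht
    rw [gpOuter_char d subs PySem.Set.empty 0 (by simp [PySem.Set.empty])]
    simp only [PySem.Set.empty, List.nil_append]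
    by_cases hall : ∀ n ∈ todos, d.contains n = true
    · have h1 : (todos.all (fun n => d.contains n)) = true := by
        simp only [List.all_eq_true]
        intro n hn
        exact hall n hn
      rw [h1]
      by_cases hnd : todos.Nodup
      · rw [if_pos ⟨hall, hnd⟩]
        dsimp only
        have h2 : ¬ (PySem.Set.len (PySem.Set.ofList todos) ≠ PySem.List.len todos) := by
          simp [PySem.Set.len, PySem.List.len_eq, PySem.Set.ofList_eq_self_of_nodup todos hnd]
        rw [Bool.not_true, if_neg (show ¬ ((false : Bool) = true) by simp), if_neg h2]
        have hknd : d.keys.Nodup := PySem.Dict.nodup_keys_ofList ma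
        have hsub : ∀ n ∈ todos, n ∈ d.keys := by
          intro n hn
          exact (PySem.Dict.contains_iff_mem_keys d n).mp (hall n hn)
        have hsize : (PySem.Dict.size d : Int) = (d.keys.length : Int) := by
          simp [PySem.Dict.size, PySem.Dict.keys]
        have hlen_iff := nodup_subset_length_iff hnd hknd hsub
        by_cases heq : (todos.length = d.keys.length)
        · have hE : PySem.Set.equal (PySem.Set.ofList todos) (PySem.Set.ofList d.keys) = true := by
            rw [PySem.Set.equal_iff _ _]
            intro x
            rw [PySem.Set.mem_ofList _ x, PySem.Set.mem_ofList _ x]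
            exact hlen_iff.mp heq x
          rw [hE, Bool.not_true, if_neg (show ¬ ((false : Bool) = true) by simp)]
          have hA : ¬ (PySem.Set.len todos ≠ (PySem.Dict.size d : Int)) := by
            simp only [PySem.Set.len, ne_eq, Decidable.not_not]
            rw [hsize]
            exact_mod_cast heq
          rw [if_neg hA, zero_add]
        · have hE : PySem.Set.equal (PySem.Set.ofList todos) (PySem.Set.ofList d.keys) = false := by
            rw [Bool.eq_false_iff]
            intro hc
            rw [PySem.Set.equal_iff _ _] at hc
            apply heq
            apply hlen_iff.mpr
            intro x
            have hx := hc x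
            rwa [PySem.Set.mem_ofList _ x, PySem.Set.mem_ofList _ x] at hx
          rw [hE, Bool.not_false, if_pos (show (true : Bool) = true from rfl)]
          have hA : (PySem.Set.len todos ≠ (PySem.Dict.size d : Int)) := by
            simp only [PySem.Set.len, ne_eq]
            rw [hsize]
            exact_mod_cast heq
          rw [if_pos hA]
      · rw [if_neg (fun hx => hnd hx.2)]
        have h2 : PySem.Set.len (PySem.Set.ofList todos) ≠ PySem.List.len todos := by
          simp only [PySem.Set.len, PySem.List.len_eq, ne_eq, Int.natCast_inj]
          exact fun hc => hnd ((length_ofList_eq_iff todos).mp hc)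
        rw [Bool.not_true, if_neg (show ¬ ((false : Bool) = true) by simp), if_pos h2]
    · rw [if_neg (fun hx => hall hx.1)]
      have h1 : (todos.all (fun n => d.contains n)) = false := by
        rw [Bool.eq_false_iff]
        intro hc
        apply hall
        intro n hn
        exact (List.all_eq_true.mp hc) n hn
      rw [h1, Bool.not_false, if_pos rfl]
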